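-- pv_equiv track=rewrite | github.com/MrBrantCode/unitest_baseline | mut_generate/mist_train_taco/taco_4957/solution.py | compare_numbers_in_bases
-- ===== SOURCE A (Python) =====
-- def compare_numbers_in_bases(n, b_x, arrx, m, b_y, arry):
--     """
--     Compares two numbers X and Y represented in different bases.
--
--     Parameters:
--     n (int): Number of digits in the base b_x representation of X.
--     b_x (int): Base of X.
--     arrx (list[int]): List of digits of X.
--     m (int): Number of digits in the base b_y representation of Y.
--     b_y (int): Base of Y.
--     arry (list[int]): List of digits of Y.
--
--     Returns:
--     str: A single character indicating the comparison result:
--          '<' if X < Y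
--          '>' if X > Y
--          '=' if X = Y
--     """
--     sumx = sumy = 0
--
--     # Convert X from base b_x to decimal
--     for i in range(n):
--         sumx += pow(b_x, n - 1 - i) * arrx[i]
--
--     # Convert Y from base b_y to decimal
--     for j in range(m):
--         sumy += pow(b_y, m - 1 - j) * arry[j]
--
--     # Compare the two decimal values
--     if sumx > sumy:
--         return '>'
--     elif sumx < sumy:
--         return '<'
--     else:
--         return '='
-- ===== SOURCE B (Python) =====
-- def compare_numbers_in_bases(n, b_x, arrx, m, b_y, arry):
--     """Horner evaluation over the digit-list prefix itself (no index arithmetic,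
--     no pow), then compare the sign of the difference."""
--     def value(base, digits):
--         acc = 0
--         for d in digits:
--             acc = acc * base + d
--         return acc
--     diff = value(b_x, arrx[:max(n, 0)]) - value(b_y, arry[:max(m, 0)])
--     if diff < 0:
--         return '<'
--     if diff > 0:
--         return '>'
--     return '='
-- ===== Notes on version B (the rewrite author's own statement) =====
-- stated objective: faster
-- what changed: Replaced the index-driven sum of pow(b, n-1-i)*digit with Horner evaluation folding directly over the digit-list prefix (one multiply-add per digit, no pow, no index arithmetic), and compares via the sign of the difference.
import Mathlib
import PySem

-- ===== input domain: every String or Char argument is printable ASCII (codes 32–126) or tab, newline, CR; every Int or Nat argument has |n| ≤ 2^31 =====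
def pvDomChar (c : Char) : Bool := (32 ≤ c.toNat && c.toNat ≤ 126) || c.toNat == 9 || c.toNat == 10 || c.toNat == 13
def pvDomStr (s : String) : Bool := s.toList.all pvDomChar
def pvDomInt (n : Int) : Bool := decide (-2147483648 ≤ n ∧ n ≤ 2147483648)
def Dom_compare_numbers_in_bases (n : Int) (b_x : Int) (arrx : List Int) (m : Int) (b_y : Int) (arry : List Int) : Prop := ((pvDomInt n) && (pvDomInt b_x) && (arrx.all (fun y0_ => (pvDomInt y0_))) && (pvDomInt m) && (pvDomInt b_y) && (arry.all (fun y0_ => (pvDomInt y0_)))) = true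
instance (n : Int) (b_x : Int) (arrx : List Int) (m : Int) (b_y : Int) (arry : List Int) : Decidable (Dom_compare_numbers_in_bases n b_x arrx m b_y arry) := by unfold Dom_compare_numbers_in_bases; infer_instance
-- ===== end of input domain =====

-- B replaces A's index-driven pow(b, n-1-i) sum by Horner evaluation folding over the digit-list
-- prefix itself, and compares the sign of the difference.

-- ===== PORT A =====
-- A's loop: sumx += pow(b_x, n-1-i) * arrx[i] for i in range(n)
def pvPowSum (b : Int) (xs : List Int) (k : Int) : Int :=
  (PySem.List.pyRange 0 k 1).foldl
    (fun s i => s + b ^ ((k - 1 - i).toNat) * PySem.List.pyGetD xs i 0) 0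

def compare_numbers_in_bases (n : Int) (b_x : Int) (arrx : List Int) (m : Int) (b_y : Int) (arry : List Int) : String :=
  let sumx := pvPowSum b_x arrx n
  let sumy := pvPowSum b_y arry m
  if sumx > sumy then ">" else if sumx < sumy then "<" else "="

-- ===== PORT B =====
-- B's inner function `value`: acc = acc * base + d for each digit d of the list
def pvHornerAcc (b : Int) : List Int → Int → Int
  | [], acc => acc
  | d :: ds, acc => pvHornerAcc b ds (acc * b + d)

def compare_numbers_in_bases_alt (n : Int) (b_x : Int) (arrx : List Int) (m : Int) (b_y : Int) (arry : List Int) : String :=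
  let diff := pvHornerAcc b_x (PySem.List.slice arrx none (some (max n 0))) 0
            - pvHornerAcc b_y (PySem.List.slice arry none (some (max m 0))) 0
  if diff < 0 then "<" else if diff > 0 then ">" else "="

-- ===== PRECONDITION & SPEC =====
-- Pre_ excludes exactly the inputs where Python A raises IndexError: n > len(arrx) or m > len(arry)
-- (the loop reads arrx[i] for i in range(n); for n ≤ 0 the loop is empty).
def Pre_compare_numbers_in_bases (n : Int) (b_x : Int) (arrx : List Int) (m : Int) (b_y : Int) (arry : List Int) : Prop :=
  n ≤ (arrx.length : Int) ∧ m ≤ (arry.length : Int)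
instance (n : Int) (b_x : Int) (arrx : List Int) (m : Int) (b_y : Int) (arry : List Int) : Decidable (Pre_compare_numbers_in_bases n b_x arrx m b_y arry) := by unfold Pre_compare_numbers_in_bases; infer_instance

def pvWitness_compare_numbers_in_bases : Int × Int × List Int × Int × Int × List Int :=
  (3, 2, [1, 0, 1], 2, 10, [1, 2])

def Spec_compare_numbers_in_bases (n : Int) (b_x : Int) (arrx : List Int) (m : Int) (b_y : Int) (arry : List Int) (out : String) : Prop := out = compare_numbers_in_bases_alt n b_x arrx m b_y arry
instance (n : Int) (b_x : Int) (arrx : List Int) (m : Int) (b_y : Int) (arry : List Int) (out : String) : Decidable (Spec_compare_numbers_in_bases n b_x arrx m b_y arry out) := by unfold Spec_compare_numbers_in_bases; infer_instance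

-- ===== CLAIM (what is proved, stated in full; the proofs are below) =====
def Claim_equal_compare_numbers_in_bases : Prop := ∀ (n : Int) (b_x : Int) (arrx : List Int) (m : Int) (b_y : Int) (arry : List Int), Dom_compare_numbers_in_bases n b_x arrx m b_y arry → Pre_compare_numbers_in_bases n b_x arrx m b_y arry → Spec_compare_numbers_in_bases n b_x arrx m b_y arry (compare_numbers_in_bases n b_x arrx m b_y arry)


-- ===== LEMMAS AND PROOFS =====

-- pvHornerAcc is the left fold of the multiply-add step
lemma pvHornerAcc_eq_foldl (b : Int) (ds : List Int) (acc : Int) :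
    pvHornerAcc b ds acc = ds.foldl (fun v d => v * b + d) acc := by
  induction ds generalizing acc with
  | nil => rfl
  | cons d ds ih => simp [pvHornerAcc, ih]

-- A's pow-sum over range(k) equals the index-Horner fold over range(k)
lemma powsum_eq_horner_nat (b : Int) (g : Int → Int) (k : Nat) :
    (PySem.List.pyRange 0 (k : Int) 1).foldl
      (fun s i => s + b ^ (((k : Int) - 1 - i).toNat) * g i) 0
    = (PySem.List.pyRange 0 (k : Int) 1).foldl (fun v i => v * b + g i) 0 := by
  induction k with
  | zero => simp [PySem.List.pyRange_one_eq_nil]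
  | succ k ih =>
    have hk : (0 : Int) ≤ (k : Int) := by positivity
    have hsucc : ((k + 1 : Nat) : Int) = (k : Int) + 1 := by push_cast; ring
    rw [hsucc, PySem.List.pyRange_one_succ_right hk, List.foldl_append, List.foldl_append]
    simp only [List.foldl_cons, List.foldl_nil]
    rw [PySem.List.foldl_add] at *
    have hmap : (List.map (fun i => b ^ (((k : Int) + 1 - 1 - i).toNat) * g i) (PySem.List.pyRange 0 (k:Int) 1)).sum
        = b * (List.map (fun i => b ^ (((k : Int) - 1 - i).toNat) * g i) (PySem.List.pyRange 0 (k:Int) 1)).sum := by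
      rw [← List.sum_map_mul_left]
      congr 1
      apply List.map_congr_left
      intro i hi
      have hb := (PySem.List.mem_pyRange_one).1 hi
      have he : ((k : Int) + 1 - 1 - i).toNat = ((k : Int) - 1 - i).toNat + 1 := by omega
      rw [he, pow_succ]; ring
    rw [hmap]
    have he0 : ((k : Int) + 1 - 1 - (k : Int)).toNat = 0 := by omega
    rw [he0]
    simp only [zero_add] at ih ⊢
    rw [ih]; ring

-- the index-Horner fold over range(k) equals the fold over the first k digits
lemma horner_range_eq_take (b : Int) (xs : List Int) (k : Nat) (hk : k ≤ xs.length) (acc : Int) :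
    (PySem.List.pyRange 0 (k : Int) 1).foldl
      (fun v i => v * b + PySem.List.pyGetD xs i 0) acc
    = (xs.take k).foldl (fun v d => v * b + d) acc := by
  induction k generalizing acc with
  | zero => simp [PySem.List.pyRange_one_eq_nil]
  | succ k ih =>
    have hk' : k ≤ xs.length := by omega
    have hklt : k < xs.length := by omega
    have hknn : (0 : Int) ≤ (k : Int) := by positivity
    have hsucc : ((k + 1 : Nat) : Int) = (k : Int) + 1 := by push_cast; ring
    rw [hsucc, PySem.List.pyRange_one_succ_right hknn, List.foldl_append]
    rw [List.take_add_one, List.foldl_append, ih hk']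
    simp [PySem.List.pyGetD_natCast, List.getD, List.getElem?_eq_getElem hklt]

lemma pvPowSum_eq_hornerAcc (b : Int) (xs : List Int) (k : Int)
    (h : k ≤ (xs.length : Int)) :
    pvPowSum b xs k = pvHornerAcc b (PySem.List.slice xs none (some (max k 0))) 0 := by
  have hmax : (0:Int) ≤ max k 0 := le_max_right _ _
  rw [PySem.List.slice_to, pvHornerAcc_eq_foldl]
  case hb => exact hmax
  have htn : (max k 0).toNat = k.toNat := by omega
  rw [htn]
  unfold pvPowSum
  by_cases hk : k ≤ 0
  · have : k.toNat = 0 := by omega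
    rw [PySem.List.pyRange_one_eq_nil hk, this]; rfl
  · have hkk : k = ((k.toNat : Nat) : Int) := by omega
    rw [hkk, powsum_eq_horner_nat b (fun i => PySem.List.pyGetD xs i 0) k.toNat,
      horner_range_eq_take b xs k.toNat (by omega) 0]
    simp [htn]

-- ===== VERDICT (by name: the statement is the Claim_ definition above) =====
theorem compare_numbers_in_bases_spec : Claim_equal_compare_numbers_in_bases := by
  intro n b_x arrx m b_y arry _ hpre
  unfold Spec_compare_numbers_in_bases compare_numbers_in_bases compare_numbers_in_bases_alt
  rw [← pvPowSum_eq_hornerAcc b_x arrx n hpre.1, ← pvPowSum_eq_hornerAcc b_y arry m hpre.2]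
  set sx := pvPowSum b_x arrx n with hsx
  set sy := pvPowSum b_y arry m with hsy
  show (if sx > sy then ">" else if sx < sy then "<" else "=")
     = (if sx - sy < 0 then "<" else if sx - sy > 0 then ">" else "=")
  by_cases h1 : sx > sy
  · rw [if_pos h1, if_neg (by omega), if_pos (by omega)]
  · by_cases h2 : sx < sy
    · rw [if_neg h1, if_pos h2, if_pos (by omega)]
    · rw [if_neg h1, if_neg h2, if_neg (by omega), if_neg (by omega)]
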